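-- pv_equiv track=rewrite | github.com/pc5401/my_BOJ | 백준/Gold/1578. 세계 정복/세계 정복.py | solve
-- ===== SOURCE A (Python) =====
-- def solve(N: int, K: int, C: list[int]) -> int:
--     low, high = 0, sum(C) // K
--     ans = 0
--     while low <= high:
--         mid = (low + high) // 2
--         # mid 그룹 확인
--         total = sum(min(c, mid) for c in C)
--         if total >= mid * K:
--             ans = mid
--             low = mid + 1
--         else:
--             high = mid - 1
--     return ans
-- ===== SOURCE B (Python) =====
-- def solve(N: int, K: int, C: list[int]) -> int:
--     # Sort once + prefix sums; each binary-search step evaluates the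
--     # feasibility check in O(log N) via bisection instead of an O(N) scan.
--     s = sorted(C)
--     n = len(s)
--     pref = [0]
--     for c in s:
--         pref.append(pref[-1] + c)
--
--     def bisect_left(x):
--         lo, hi = 0, n
--         while lo < hi:
--             m = (lo + hi) // 2
--             if s[m] < x:
--                 lo = m + 1
--             else:
--                 hi = m
--         return lo
--
--     low, high = 0, pref[n] // K
--     ans = 0
--     while low <= high:
--         mid = (low + high) // 2
--         i = bisect_left(mid)
--         if pref[i] + (n - i) * mid >= mid * K:
--             ans = mid
--             low = mid + 1
--         else:
--             high = mid - 1
--     return ans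
-- ===== Notes on version B (the rewrite author's own statement) =====
-- stated objective: alternative
-- what changed: B sorts C once and builds prefix sums, then evaluates each binary-search step's feasibility check 'sum(min(c,mid)) >= mid*K' by hand-written bisection over the sorted array instead of A's O(N) scan per step; on inputs where the outer loop is empty B still pays its sort, so no speed is claimed.
import Mathlib
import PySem

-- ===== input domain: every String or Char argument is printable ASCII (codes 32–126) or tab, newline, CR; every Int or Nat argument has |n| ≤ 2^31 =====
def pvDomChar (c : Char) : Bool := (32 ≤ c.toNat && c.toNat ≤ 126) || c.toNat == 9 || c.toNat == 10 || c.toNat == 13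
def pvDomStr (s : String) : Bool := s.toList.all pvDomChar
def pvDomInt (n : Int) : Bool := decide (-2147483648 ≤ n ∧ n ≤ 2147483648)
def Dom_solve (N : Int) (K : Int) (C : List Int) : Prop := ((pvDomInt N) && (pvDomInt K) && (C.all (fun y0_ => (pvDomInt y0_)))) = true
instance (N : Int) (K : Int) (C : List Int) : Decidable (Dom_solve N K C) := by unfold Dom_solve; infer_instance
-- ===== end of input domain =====

-- B sorts C once and keeps prefix sums, so each binary-search step evaluates
-- the feasibility check by bisection over the sorted array instead of an O(N)
-- scan per step. Return values agree on every K ≠ 0 (K = 0 raises in A).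

-- ===== PORT A =====
-- the while-loop of A; state (low, high, ans)
def solveLoopA (K : Int) (C : List Int) (low high ans : Int) : Int :=
  if _h : low ≤ high then
    let mid := PySem.Int.floordiv (low + high) 2
    -- total = sum(min(c, mid) for c in C)
    let total := C.foldl (fun acc c => acc + min c mid) 0
    if total ≥ mid * K then solveLoopA K C (mid + 1) high mid
    else solveLoopA K C low (mid - 1) ans
  else ans
termination_by (high + 1 - low).toNat
decreasing_by
  · have := PySem.Int.floordiv_two_mid_bounds _h; omega
  · have := PySem.Int.floordiv_two_mid_bounds _h; omega

def solve (N : Int) (K : Int) (C : List Int) : Int :=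
  solveLoopA K C 0 (PySem.Int.floordiv C.sum K) 0

-- ===== PORT B =====
-- pref = [0]; for c in s: pref.append(pref[-1] + c)   (pref[-1] carried as acc)
def prefAux : List Int → Int → List Int
  | [], acc => [acc]
  | c :: r, acc => acc :: prefAux r (acc + c)

-- hand-written bisect_left of Source B; s[m] is in range whenever lo < hi ≤ len s,
-- so List.getD is exact there
def bisectB (s : List Int) (x : Int) (lo hi : Nat) : Nat :=
  if lo < hi then
    -- m = (lo + hi) // 2
    if s.getD ((lo + hi) / 2) 0 < x then bisectB s x ((lo + hi) / 2 + 1) hi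
    else bisectB s x lo ((lo + hi) / 2)
  else lo
termination_by hi - lo
decreasing_by all_goals omega

-- the while-loop of B; n = s.length, the check reads pref[i] via bisection
def solveLoopB (K : Int) (s : List Int) (pref : List Int) (low high ans : Int) : Int :=
  if _h : low ≤ high then
    let mid := PySem.Int.floordiv (low + high) 2
    let i := bisectB s mid 0 s.length
    if pref.getD i 0 + ((s.length : Int) - (i : Int)) * mid ≥ mid * K then
      solveLoopB K s pref (mid + 1) high mid
    else solveLoopB K s pref low (mid - 1) ans
  else ans
termination_by (high + 1 - low).toNat
decreasing_by
  · have := PySem.Int.floordiv_two_mid_bounds _h; omega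
  · have := PySem.Int.floordiv_two_mid_bounds _h; omega

def solve_alt (N : Int) (K : Int) (C : List Int) : Int :=
  let s := PySem.List.sorted C (fun c => c)
  let pref := prefAux s 0
  solveLoopB K s pref 0 (PySem.Int.floordiv (pref.getD s.length 0) K) 0

-- ===== PRECONDITION & SPEC =====
-- K = 0 makes 'sum(C) // K' raise ZeroDivisionError in both Pythons
def Pre_solve (N : Int) (K : Int) (C : List Int) : Prop := K ≠ 0
instance (N : Int) (K : Int) (C : List Int) : Decidable (Pre_solve N K C) := by unfold Pre_solve; infer_instance
def pvWitness_solve : Int × Int × List Int := (3, 2, [3, 1, 4])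

def Spec_solve (N : Int) (K : Int) (C : List Int) (out : Int) : Prop := out = solve_alt N K C
instance (N : Int) (K : Int) (C : List Int) (out : Int) : Decidable (Spec_solve N K C out) := by unfold Spec_solve; infer_instance

-- ===== CLAIM (what is proved, stated in full; the proofs are below) =====
def Claim_equal_solve : Prop := ∀ (N : Int) (K : Int) (C : List Int), Dom_solve N K C → Pre_solve N K C → Spec_solve N K C (solve N K C)

-- ===== LEMMAS AND PROOFS =====

-- pref list: (prefAux s a)[i] = a + sum of the first i elements of s
theorem prefAux_getD (s : List Int) (a : Int) (i : Nat) (hi : i ≤ s.length) :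
    (prefAux s a).getD i 0 = a + ((s.take i).map id).sum := by
  induction s generalizing a i with
  | nil =>
    have : i = 0 := by simpa using hi
    subst this; simp [prefAux]
  | cons c r ih =>
    cases i with
    | zero => simp [prefAux]
    | succ j =>
      simp only [prefAux, List.getD_cons_succ, List.take_succ_cons, List.map_cons, List.sum_cons]
      rw [ih (a + c) j (by simpa using hi)]
      simp [id]; ring

-- bisection invariant: on a sorted segment the result r separates (< x) from (≥ x)
theorem bisectB_inv (s : List Int) (x : Int) (hs : s.Pairwise (· ≤ ·)) :
    ∀ n lo hi, hi - lo = n → lo ≤ hi → hi ≤ s.length →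
    (∀ j (hj : j < s.length), j < lo → s[j] < x) →
    (∀ j (hj : j < s.length), hi ≤ j → x ≤ s[j]) →
    lo ≤ bisectB s x lo hi ∧ bisectB s x lo hi ≤ hi ∧
    (∀ j (hj : j < s.length), j < bisectB s x lo hi → s[j] < x) ∧
    (∀ j (hj : j < s.length), bisectB s x lo hi ≤ j → x ≤ s[j]) := by
  intro n
  induction n using Nat.strong_induction_on with
  | _ n ih =>
    intro lo hi hn hlh hhi hlow hhigh
    have hsort : ∀ p q (hp : p < s.length) (hq : q < s.length), p ≤ q → s[p] ≤ s[q] := by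
      intro p q hp hq hpq
      rcases Nat.eq_or_lt_of_le hpq with rfl | hlt
      · exact le_refl _
      · exact (List.pairwise_iff_getElem.mp hs) p q hp hq hlt
    rw [bisectB]
    by_cases h : lo < hi
    · simp only [h, if_true]
      have hm : (lo + hi) / 2 < s.length := by omega
      have hget : s.getD ((lo + hi) / 2) 0 = s[(lo + hi) / 2] := List.getD_eq_getElem s 0 hm
      rw [hget]
      by_cases hc : s[(lo + hi) / 2] < x
      · simp only [hc, if_true]
        obtain ⟨h1, h2, h3, h4⟩ := ih (hi - ((lo + hi) / 2 + 1)) (by omega) ((lo + hi) / 2 + 1) hi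
          rfl (by omega) hhi
          (by intro j hj hjlt
              exact lt_of_le_of_lt (hsort j ((lo + hi) / 2) hj hm (by omega)) hc)
          hhigh
        exact ⟨by omega, h2, h3, h4⟩
      · simp only [hc, if_false]
        push_neg at hc
        obtain ⟨h1, h2, h3, h4⟩ := ih ((lo + hi) / 2 - lo) (by omega) lo ((lo + hi) / 2)
          rfl (by omega) (by omega) hlow
          (by intro j hj hjge
              exact le_trans hc (hsort ((lo + hi) / 2) j hm hj hjge))
        exact ⟨h1, by omega, h3, h4⟩
    · simp only [h, if_false]
      have heq : lo = hi := by omega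
      exact ⟨le_refl _, le_of_eq heq, hlow, by intro j hj hle; exact hhigh j hj (heq ▸ hle)⟩

-- sum of min over a list split at a separating index
theorem sumMin_split (s : List Int) (x : Int) (i : Nat) (hi : i ≤ s.length)
    (hlt : ∀ j (hj : j < s.length), j < i → s[j] < x)
    (hge : ∀ j (hj : j < s.length), i ≤ j → x ≤ s[j]) :
    ((s.map (fun c => min c x)).sum) = ((s.take i).map id).sum + ((s.length : Int) - (i : Int)) * x := by
  conv_lhs => rw [← List.take_append_drop i s]
  rw [List.map_append, List.sum_append]
  have h1 : (s.take i).map (fun c => min c x) = (s.take i).map id := by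
    apply List.map_congr_left
    intro y hy
    obtain ⟨j, hj, hji, rfl⟩ : ∃ j, ∃ hj : j < s.length, j < i ∧ s[j] = y := by
      obtain ⟨j, hjlt, hget⟩ := List.getElem_of_mem hy
      have hjl : j < s.length := by
        have := List.length_take_le i s; omega
      refine ⟨j, hjl, ?_, ?_⟩
      · have := (s.take i).length; simp at hjlt; omega
      · rw [← hget, List.getElem_take]
    simp [min_eq_left (le_of_lt (hlt j hj hji))]
  have h2 : (s.drop i).map (fun c => min c x) = (s.drop i).map (fun _ => x) := by
    apply List.map_congr_left
    intro y hy
    obtain ⟨j, hj, hget⟩ := List.getElem_of_mem hy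
    have hjl : i + j < s.length := by simp at hj; omega
    have : s[i + j] = y := by rw [← hget, List.getElem_drop]
    have hx := hge (i + j) hjl (by omega)
    rw [this] at hx
    simp [min_eq_right hx]
  rw [h1, h2]
  have h3 : ((s.drop i).map (fun _ => x)).sum = ((s.drop i).length : Int) * x := by
    induction (s.drop i) with
    | nil => simp
    | cons a t iht =>
      simp only [List.map_cons, List.sum_cons, List.length_cons, iht]
      push_cast; ring
  rw [h3]
  have h4 : ((s.drop i).length : Int) = (s.length : Int) - (i : Int) := by
    rw [List.length_drop]; omega
  rw [h4]

-- foldl accumulation of A's generator sum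
theorem foldlMin_eq (C : List Int) (x a : Int) :
    C.foldl (fun acc c => acc + min c x) a = a + (C.map (fun c => min c x)).sum := by
  induction C generalizing a with
  | nil => simp
  | cons c r ih => simp [List.foldl_cons, ih]; ring

-- the core: A's check value equals B's check value, for every mid
theorem check_eq (C : List Int) (x : Int) :
    C.foldl (fun acc c => acc + min c x) 0 =
    (prefAux (PySem.List.sorted C (fun c => c)) 0).getD
        (bisectB (PySem.List.sorted C (fun c => c)) x 0 (PySem.List.sorted C (fun c => c)).length) 0
      + (((PySem.List.sorted C (fun c => c)).length : Int)
          - (bisectB (PySem.List.sorted C (fun c => c)) x 0 (PySem.List.sorted C (fun c => c)).length : Int)) * x := by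
  set s := PySem.List.sorted C (fun c => c) with hs
  have hperm : s.Perm C := PySem.List.sorted_perm C (fun c => c) false
  have hpair : s.Pairwise (· ≤ ·) := by
    have := PySem.List.sorted_pairwise C (fun c => c)
    simpa using this
  have hinv := bisectB_inv s x hpair (s.length - 0) 0 s.length rfl (by omega) (le_refl _)
    (by intro j hj hjlt; omega) (by intro j hj hle; omega)
  obtain ⟨_, hle, hlt, hge⟩ := hinv
  rw [foldlMin_eq, prefAux_getD s 0 _ hle, zero_add, zero_add]
  have hsum : (C.map (fun c => min c x)).sum = (s.map (fun c => min c x)).sum :=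
    (List.Perm.sum_eq ((hperm.map _))).symm
  rw [hsum, sumMin_split s x _ hle hlt hge]

-- the two while-loops agree step for step
theorem loops_eq (K : Int) (C : List Int) :
    ∀ n (low high ans : Int), (high + 1 - low).toNat = n →
    solveLoopA K C low high ans =
    solveLoopB K (PySem.List.sorted C (fun c => c)) (prefAux (PySem.List.sorted C (fun c => c)) 0) low high ans := by
  intro n
  induction n using Nat.strong_induction_on with
  | _ n ih =>
    intro low high ans hn
    rw [solveLoopA, solveLoopB]
    by_cases h : low ≤ high
    · simp only [h, dif_pos]
      have hmid := PySem.Int.floordiv_two_mid_bounds h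
      set mid := PySem.Int.floordiv (low + high) 2 with hm
      rw [← check_eq C mid]
      by_cases hc : C.foldl (fun acc c => acc + min c mid) 0 ≥ mid * K
      · simp only [hc, if_pos]
        exact ih (high + 1 - (mid + 1)).toNat (by omega) (mid + 1) high mid rfl
      · simp only [hc, if_neg, not_false_iff]
        exact ih (mid - 1 + 1 - low).toNat (by omega) low (mid - 1) ans rfl
    · simp [h]

-- initial 'high' agrees: pref[n] is sum(C)
theorem high_eq (C : List Int) :
    (prefAux (PySem.List.sorted C (fun c => c)) 0).getD (PySem.List.sorted C (fun c => c)).length 0 = C.sum := by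
  set s := PySem.List.sorted C (fun c => c) with hs
  rw [prefAux_getD s 0 s.length (le_refl _)]
  simp [List.take_length]
  exact List.Perm.sum_eq (PySem.List.sorted_perm C (fun c => c) false)

-- ===== VERDICT (by name: the statement is the Claim_ definition above) =====
theorem solve_spec : Claim_equal_solve := by
  intro N K C _ _
  unfold Spec_solve solve solve_alt
  show solveLoopA K C 0 (PySem.Int.floordiv C.sum K) 0 =
    solveLoopB K (PySem.List.sorted C (fun c => c)) (prefAux (PySem.List.sorted C (fun c => c)) 0) 0
      (PySem.Int.floordiv ((prefAux (PySem.List.sorted C (fun c => c)) 0).getD (PySem.List.sorted C (fun c => c)).length 0) K) 0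
  rw [high_eq]
  exact loops_eq K C _ 0 (PySem.Int.floordiv C.sum K) 0 rfl
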